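-- pv_equiv track=rewrite | github.com/pepe-olivert/GA_competition | GA.py | translate_solution
-- ===== SOURCE A (Python) =====
-- def translate_solution(solution):
--     """
--     Function to translate the solution to the desired form.
--
--     :param solution: A given solution to translate.
--     :type solution: str
--
--     :return: The new solution.
--     :rtype: list
--     """
--     final = []
--     aux = [0]
--     for s in solution:
--         if s > 0:
--             aux.append(s)
--         else:
--             aux.append(0)
--             final.append(aux)
--             aux=[0]
--
--     aux.append(0)
--     final.append(aux)
--     return final
-- ===== SOURCE B (Python) =====
-- def translate_solution(solution):
--     final = []
--     start = 0
--     while True: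
--         end = start
--         while end < len(solution) and solution[end] > 0:
--             end += 1
--         final.append([0] + solution[start:end] + [0])
--         if end == len(solution):
--             return final
--         start = end + 1
-- ===== Notes on version B (the rewrite author's own statement) =====
-- stated objective: alternative
-- what changed: B replaces A's per-element loop with a flushed 0-prefixed accumulator by a two-pointer index scan: an inner while advances 'end' over each run of positives, and the segment is emitted as the wrapped slice solution[start:end] before jumping start past the delimiter.
import Mathlib
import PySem

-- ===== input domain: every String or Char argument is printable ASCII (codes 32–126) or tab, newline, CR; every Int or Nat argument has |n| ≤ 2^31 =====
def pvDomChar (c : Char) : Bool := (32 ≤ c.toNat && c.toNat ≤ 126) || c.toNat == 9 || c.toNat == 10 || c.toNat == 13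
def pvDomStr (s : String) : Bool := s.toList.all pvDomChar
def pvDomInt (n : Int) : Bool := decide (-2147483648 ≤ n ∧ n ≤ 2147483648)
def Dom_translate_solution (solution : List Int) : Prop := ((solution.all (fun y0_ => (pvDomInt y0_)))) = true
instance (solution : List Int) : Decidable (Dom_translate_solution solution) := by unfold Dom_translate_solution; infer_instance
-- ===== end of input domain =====

-- B changes the decomposition: a two-pointer scan over indices that emits whole slices,
-- instead of A's per-element loop with a flushed accumulator (objective: alternative).

-- ===== PORT A =====
def tsStepA (st : List (List Int) × List Int) (s : Int) : List (List Int) × List Int :=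
  if s > 0 then (st.1, st.2 ++ [s]) else (st.1 ++ [st.2 ++ [0]], [0])

def translate_solution (solution : List Int) : List (List Int) :=
  let p := solution.foldl tsStepA ([], [0])
  p.1 ++ [p.2 ++ [0]]

-- ===== PORT B =====
-- inner while: advance end while end < len(solution) and solution[end] > 0
def tsScanEnd (solution : List Int) (e : Nat) : Nat :=
  if h : e < solution.length then
    if solution[e] > 0 then tsScanEnd solution (e + 1) else e
  else e
termination_by solution.length - e

lemma tsScanEnd_ge (solution : List Int) (e : Nat) : e ≤ tsScanEnd solution e := by
  unfold tsScanEnd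
  split_ifs with h h'
  · exact le_trans (Nat.le_succ e) (tsScanEnd_ge solution (e + 1))
  · exact le_refl e
  · exact le_refl e
termination_by solution.length - e

lemma tsScanEnd_le (solution : List Int) (e : Nat) (he : e ≤ solution.length) :
    tsScanEnd solution e ≤ solution.length := by
  unfold tsScanEnd
  split_ifs with h h'
  · exact tsScanEnd_le solution (e + 1) h
  · exact he
  · exact he
termination_by solution.length - e

-- outer while: emit one wrapped slice per segment, jump start past the delimiter
def tsLoop (solution : List Int) (final : List (List Int)) (start : Nat)
    (hs : start ≤ solution.length) : List (List Int) :=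
  let e := tsScanEnd solution start
  let final' := final ++ [0 :: PySem.List.slice solution (some (start : Int)) (some (e : Int)) ++ [0]]
  if h : e = solution.length then final'
  else tsLoop solution final' (e + 1)
    (by have := tsScanEnd_le solution start hs; omega)
termination_by solution.length - start
decreasing_by
  have h1 := tsScanEnd_ge solution start
  have h2 := tsScanEnd_le solution start hs
  omega

def translate_solution_alt (solution : List Int) : List (List Int) :=
  tsLoop solution [] 0 (Nat.zero_le _)

-- ===== PRECONDITION & SPEC =====
def Spec_translate_solution (solution : List Int) (out : List (List Int)) : Prop := out = translate_solution_alt solution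
instance (solution : List Int) (out : List (List Int)) : Decidable (Spec_translate_solution solution out) := by unfold Spec_translate_solution; infer_instance

-- ===== CLAIM (what is proved, stated in full; the proofs are below) =====
def Claim_equal_translate_solution : Prop := ∀ (solution : List Int), Dom_translate_solution solution → Spec_translate_solution solution (translate_solution solution)

-- ===== LEMMAS AND PROOFS =====
-- folding A's step over the all-positive segment found by the scan just appends it to cur
lemma ts_scan_fold (sol : List Int) (s : Nat) (hs : s ≤ sol.length) :
    ∀ (acc : List (List Int)) (c : List Int),
    ((sol.drop s).take (tsScanEnd sol s - s)).foldl tsStepA (acc, c)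
      = (acc, c ++ (sol.drop s).take (tsScanEnd sol s - s)) := by
  intro acc c
  rw [tsScanEnd]
  split_ifs with h h'
  · have he1 := tsScanEnd_ge sol (s + 1)
    have hdrop : sol.drop s = sol[s] :: sol.drop (s + 1) := List.drop_eq_getElem_cons h
    have htake : (sol.drop s).take (tsScanEnd sol (s + 1) - s)
        = sol[s] :: (sol.drop (s + 1)).take (tsScanEnd sol (s + 1) - (s + 1)) := by
      rw [hdrop]
      have : tsScanEnd sol (s + 1) - s = ((tsScanEnd sol (s + 1) - (s + 1)) + 1) := by omega
      rw [this, List.take_succ_cons]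
    rw [htake]
    simp only [List.foldl_cons, tsStepA, if_pos h']
    rw [ts_scan_fold sol (s + 1) h (acc) (c ++ [sol[s]])]
    simp
  · simp
  · simp
termination_by sol.length - s

-- the scan stops at a non-positive element (when it stops before the end)
lemma ts_scan_stop (sol : List Int) (s : Nat) :
    ∀ (h : tsScanEnd sol s < sol.length), ¬ sol[tsScanEnd sol s] > 0 := by
  intro hlt
  by_cases h : s < sol.length
  · by_cases h' : sol[s] > 0
    · have heq : tsScanEnd sol s = tsScanEnd sol (s + 1) := by
        rw [tsScanEnd]; simp [h, h']
      simp only [heq] at hlt ⊢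
      exact ts_scan_stop sol (s + 1) hlt
    · have heq : tsScanEnd sol s = s := by
        rw [tsScanEnd]; simp [h, h']
      simp only [heq]; exact h'
  · have heq : tsScanEnd sol s = s := by
      rw [tsScanEnd]; simp [h]
    omega
termination_by sol.length - s

-- main invariant: resuming A's fold at index s with a fresh [0] accumulator equals B's loop from s
lemma ts_main (sol : List Int) (s : Nat) (hs : s ≤ sol.length) (acc : List (List Int)) :
    ((sol.drop s).foldl tsStepA (acc, [0])).1 ++ [((sol.drop s).foldl tsStepA (acc, [0])).2 ++ [0]]
      = tsLoop sol acc s hs := by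
  have hge := tsScanEnd_ge sol s
  have hle := tsScanEnd_le sol s hs
  have hslice : PySem.List.slice sol (some (s : Int)) (some ((tsScanEnd sol s : Nat) : Int))
      = (sol.drop s).take (tsScanEnd sol s - s) := PySem.List.slice_natCast sol s _
  have hdecomp : sol.drop s = (sol.drop s).take (tsScanEnd sol s - s) ++ sol.drop (tsScanEnd sol s) := by
    have : sol.drop (tsScanEnd sol s) = (sol.drop s).drop (tsScanEnd sol s - s) := by
      rw [List.drop_drop]; congr 1; omega
    rw [this, List.take_append_drop]
  rw [tsLoop]
  split_ifs with h
  · -- the scan consumed the whole rest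
    have hnil : sol.drop (tsScanEnd sol s) = [] := by rw [h]; exact List.drop_length
    conv_lhs => rw [hdecomp]
    rw [hnil, List.append_nil, ts_scan_fold sol s hs]
    simp [hslice]
  · -- delimiter at the scan position, flush and recurse
    have helt : tsScanEnd sol s < sol.length := by omega
    have hstop : ¬ sol[tsScanEnd sol s] > 0 := ts_scan_stop sol s helt
    have hcons : sol.drop (tsScanEnd sol s) = sol[tsScanEnd sol s] :: sol.drop (tsScanEnd sol s + 1) :=
      List.drop_eq_getElem_cons helt
    conv_lhs => rw [hdecomp]
    rw [hcons, List.foldl_append, ts_scan_fold sol s hs]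
    simp only [List.foldl_cons, tsStepA, if_neg hstop]
    have hrec := ts_main sol (tsScanEnd sol s + 1) (by omega)
      (acc ++ [(0 :: (sol.drop s).take (tsScanEnd sol s - s)) ++ [0]])
    simp only [hslice]
    simpa using hrec
termination_by sol.length - s

-- ===== VERDICT (by name: the statement is the Claim_ definition above) =====
theorem translate_solution_spec : Claim_equal_translate_solution := by
  intro solution _
  show translate_solution solution = translate_solution_alt solution
  have := ts_main solution 0 (Nat.zero_le _) []
  simpa [translate_solution, translate_solution_alt] using this
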